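-- pv_equiv track=rewrite | github.com/Rollpopptery/circuitbloom | gen_pcb.py | remove_all_zones
-- ===== SOURCE A (Python) =====
-- def remove_all_zones(text):
--     """Remove all (zone ...) blocks."""
--     result = []
--     i = 0
--     while i < len(text):
--         if text[i:i+5] == '(zone' and (i == 0 or text[i-1] in '\n\t '):
--             depth = 0
--             j = i
--             while j < len(text):
--                 if text[j] == '(':
--                     depth += 1
--                 elif text[j] == ')':
--                     depth -= 1
--                     if depth == 0:
--                         break
--                 elif text[j] == '"':
--                     j += 1
--                     while j < len(text) and text[j] != '"':
--                         if text[j] == '\\':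
--                             j += 1
--                         j += 1
--                 j += 1
--             while i > 0 and text[i-1] in '\n\t ':
--                 i -= 1
--             i = j + 1
--             continue
--         result.append(text[i])
--         i += 1
--     return ''.join(result)
-- ===== SOURCE B (Python) =====
-- def remove_all_zones(text):
--     """Remove all (zone ...) blocks.
--
--     Single flat pass with an explicit state machine (skip-depth / in-string /
--     escape flags) instead of A's nested scanning loops.
--     """
--     out = []
--     depth = 0          # 0 = copying; >0 = inside a (zone ...) block being skipped
--     in_str = False
--     esc = False
--     prev = None
--     for i, c in enumerate(text):
--         if depth == 0:
--             if text.startswith('(zone', i) and (i == 0 or prev in '\n\t '):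
--                 depth = 1          # c is the block's opening '('
--             else:
--                 out.append(c)
--         elif in_str:
--             if esc:
--                 esc = False
--             elif c == '\\':
--                 esc = True
--             elif c == '"':
--                 in_str = False
--         elif c == '(':
--             depth += 1
--         elif c == ')':
--             depth -= 1
--         elif c == '"':
--             in_str = True
--         prev = c
--     return ''.join(out)
-- ===== Notes on version B (the rewrite author's own statement) =====
-- stated objective: simpler
-- what changed: A's nested scanning loops (outer copy loop, inner balanced-paren block scan, innermost string-literal scan with index jumps) are replaced by ONE flat pass over the characters driven by an explicit state machine (skip-depth, in-string and escape flags).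
import Mathlib
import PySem

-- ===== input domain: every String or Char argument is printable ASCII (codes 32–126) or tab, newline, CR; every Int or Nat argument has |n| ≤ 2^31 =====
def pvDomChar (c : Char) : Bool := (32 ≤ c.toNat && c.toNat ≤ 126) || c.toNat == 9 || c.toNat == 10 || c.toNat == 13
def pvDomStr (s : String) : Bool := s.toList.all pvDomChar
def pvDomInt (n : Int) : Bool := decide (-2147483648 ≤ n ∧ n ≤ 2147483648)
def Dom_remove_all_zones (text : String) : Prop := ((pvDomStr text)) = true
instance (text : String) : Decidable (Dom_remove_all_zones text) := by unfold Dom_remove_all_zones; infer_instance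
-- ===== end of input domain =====

-- B replaces A's nested scanning loops (outer copy loop + inner balanced-paren scan +
-- inner string scan) by ONE flat pass with an explicit state machine (skip-depth,
-- in-string and escape flags); objective: simpler.  A's loops are totalized with a fuel
-- parameter (the scanned index strictly increases each step, so fuel = len(text) is
-- always enough); B's machine is structural recursion on the character list.

-- ===== PORT A =====

-- inner-inner loop: while j < len(text) and text[j] != '"': if text[j]=='\\': j += 1; j += 1
def pvSkipStrA (l : List Char) : Nat → Nat → Nat
  | 0, j => j
  | fuel + 1, j =>
    if j < l.length then
      if l.getD j ' ' = '"' then j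
      else if l.getD j ' ' = '\\' then pvSkipStrA l fuel (j + 2)
      else pvSkipStrA l fuel (j + 1)
    else j

-- inner loop: balanced-paren scan from j with string skipping; returns the index of the
-- closing ')' (or an index ≥ len(text) if the scan runs off the end)
def pvFindEndA (l : List Char) : Nat → Nat → Int → Nat
  | 0, j, _ => j
  | fuel + 1, j, depth =>
    if j < l.length then
      if l.getD j ' ' = '(' then pvFindEndA l fuel (j + 1) (depth + 1)
      else if l.getD j ' ' = ')' then
        if depth - 1 = 0 then j else pvFindEndA l fuel (j + 1) (depth - 1)
      else if l.getD j ' ' = '"' then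
        pvFindEndA l fuel (pvSkipStrA l l.length (j + 1) + 1) depth
      else pvFindEndA l fuel (j + 1) depth
    else j

-- zone-start test: text[i:i+5] == '(zone' and (i == 0 or text[i-1] in '\n\t ')
def pvZoneAtA (l : List Char) (i : Nat) : Bool :=
  ((l.drop i).take 5 = ['(', 'z', 'o', 'n', 'e']) &&
    (i = 0 || (l.getD (i - 1) ' ' = '\n' || l.getD (i - 1) ' ' = '\t' || l.getD (i - 1) ' ' = ' '))

-- outer while loop of A (the backtracking loop 'while i > 0 and text[i-1] in ...: i -= 1'
-- only writes to i, which the very next statement 'i = j + 1' overwrites, so it has no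
-- effect on the state and is omitted here)
def pvLoopA (l : List Char) : Nat → Nat → List Char → List Char
  | 0, _, acc => acc
  | fuel + 1, i, acc =>
    if i < l.length then
      if pvZoneAtA l i then
        pvLoopA l fuel (pvFindEndA l l.length i 0 + 1) acc
      else
        pvLoopA l fuel (i + 1) (acc ++ [l.getD i ' '])
    else acc

def remove_all_zones (text : String) : String :=
  String.ofList (pvLoopA text.toList text.toList.length 0 [])

-- ===== PORT B =====

-- B's zone-start test: text.startswith('(zone', i) and (i == 0 or prev in '\n\t ')
-- (prev = None exactly at i == 0)
def pvZoneStartB (cs : List Char) (prev : Option Char) : Bool :=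
  (cs.take 5 = ['(', 'z', 'o', 'n', 'e']) &&
    (prev.isNone || prev = some '\n' || prev = some '\t' || prev = some ' ')

-- B's state machine: one structural pass over the characters carrying
-- (prev char, skip-depth, in-string flag, escape flag)
def pvMachB : List Char → Option Char → Int → Bool → Bool → List Char
  | [], _, _, _, _ => []
  | c :: rest, prev, depth, instr, esc =>
    if depth = 0 then
      if pvZoneStartB (c :: rest) prev then
        pvMachB rest (some c) 1 false false
      else
        c :: pvMachB rest (some c) 0 false false
    else if instr then
      if esc then pvMachB rest (some c) depth true false
      else if c = '\\' then pvMachB rest (some c) depth true true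
      else if c = '"' then pvMachB rest (some c) depth false false
      else pvMachB rest (some c) depth true false
    else if c = '(' then pvMachB rest (some c) (depth + 1) false false
    else if c = ')' then pvMachB rest (some c) (depth - 1) false false
    else if c = '"' then pvMachB rest (some c) depth true false
    else pvMachB rest (some c) depth false false

def remove_all_zones_alt (text : String) : String :=
  String.ofList (pvMachB text.toList none 0 false false)

-- ===== PRECONDITION & SPEC =====
def Spec_remove_all_zones (text : String) (out : String) : Prop := out = remove_all_zones_alt text
instance (text : String) (out : String) : Decidable (Spec_remove_all_zones text out) := by unfold Spec_remove_all_zones; infer_instance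

-- ===== CLAIM (what is proved, stated in full; the proofs are below) =====
def Claim_equal_remove_all_zones : Prop := ∀ (text : String), Dom_remove_all_zones text → Spec_remove_all_zones text (remove_all_zones text)

-- ===== LEMMAS AND PROOFS =====

-- the previous-char the machine carries at position i
def pvPrevAt (l : List Char) (i : Nat) : Option Char :=
  if i = 0 then none else some (l.getD (i - 1) ' ')

-- while skipping (depth ≠ 0) the machine never reads prev
theorem pvMachB_prev_irrel (cs : List Char) (p q : Option Char) (d : Int) (i e : Bool)
    (hd : d ≠ 0) : pvMachB cs p d i e = pvMachB cs q d i e := by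
  cases cs with
  | nil => rfl
  | cons c rest => simp only [pvMachB, hd, if_false]

theorem pvSkipStrA_ge (l : List Char) (fuel j : Nat) : j ≤ pvSkipStrA l fuel j := by
  induction fuel generalizing j with
  | zero => simp [pvSkipStrA]
  | succ f ih =>
      simp only [pvSkipStrA]
      split_ifs with h1 h2 h3
      · exact le_refl j
      · exact le_trans (by omega) (ih (j + 2))
      · exact le_trans (by omega) (ih (j + 1))
      · exact le_refl j

theorem pvFindEndA_ge (l : List Char) (fuel : Nat) (j : Nat) (d : Int) :
    j ≤ pvFindEndA l fuel j d := by
  induction fuel generalizing j d with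
  | zero => simp [pvFindEndA]
  | succ f ih =>
      simp only [pvFindEndA]
      split_ifs with h1 h2 h3 h4 h5
      · exact le_trans (by omega) (ih (j + 1) (d + 1))
      · exact le_refl j
      · exact le_trans (by omega) (ih (j + 1) (d - 1))
      · have := pvSkipStrA_ge l l.length (j + 1)
        exact le_trans (by omega) (ih (pvSkipStrA l l.length (j + 1) + 1) d)
      · exact le_trans (by omega) (ih (j + 1) d)
      · exact le_refl j

theorem pvDrop_cons (l : List Char) (j : Nat) (hj : j < l.length) :
    l.drop j = l.getD j ' ' :: l.drop (j + 1) := by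
  rw [List.drop_eq_getElem_cons hj, List.getD_eq_getElem l ' ' hj]

-- the machine inside a string literal agrees with A's string-skipping scan
theorem pvMachB_string (l : List Char) (fuel : Nat) (j : Nat) (p : Option Char) (d : Int)
    (hd : d ≠ 0) (hf : l.length ≤ fuel + j) :
    pvMachB (l.drop j) p d true false
      = pvMachB (l.drop (pvSkipStrA l fuel j + 1)) p d false false := by
  induction fuel generalizing j with
  | zero =>
      have h1 : l.drop j = [] := List.drop_eq_nil_of_le (by omega)
      have h2 : l.drop (pvSkipStrA l 0 j + 1) = [] := by
        simp only [pvSkipStrA]; exact List.drop_eq_nil_of_le (by omega)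
      rw [h1, h2]; rfl
  | succ f ih =>
      by_cases hj : j < l.length
      · rw [pvDrop_cons l j hj]
        simp only [pvSkipStrA, hj, if_true]
        by_cases hq : l.getD j ' ' = '"'
        · -- closing quote: machine clears in_str, A returns j
          rw [if_pos hq]
          simp only [pvMachB, hd, if_false, hq, if_true]
          exact pvMachB_prev_irrel _ _ _ _ _ _ hd
        · rw [if_neg hq]
          by_cases hb : l.getD j ' ' = '\\'
          · -- escape: machine consumes two chars, A jumps j+2
            rw [if_pos hb]
            simp only [pvMachB, hd, if_false, hb, if_true]
            by_cases hj1 : j + 1 < l.length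
            · rw [pvDrop_cons l (j + 1) hj1]
              simp only [pvMachB, hd, if_false, if_true]
              rw [pvMachB_prev_irrel _ _ p _ _ _ hd, ih (j + 2) (by omega)]
              simp
            · have h1 : l.drop (j + 1) = [] := List.drop_eq_nil_of_le (by omega)
              have h2 : l.drop (pvSkipStrA l f (j + 2) + 1) = [] := by
                have := pvSkipStrA_ge l f (j + 2)
                exact List.drop_eq_nil_of_le (by omega)
              rw [h1, h2]; rfl
          · rw [if_neg hb]
            simp only [pvMachB, hd, if_false, hq, hb, if_true]
            rw [pvMachB_prev_irrel _ _ p _ _ _ hd, ih (j + 1) (by omega)]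
            simp
      · have h1 : l.drop j = [] := List.drop_eq_nil_of_le (by omega)
        have h2 : l.drop (pvSkipStrA l (f + 1) j + 1) = [] := by
          have := pvSkipStrA_ge l (f + 1) j
          exact List.drop_eq_nil_of_le (by omega)
        rw [h1, h2]; rfl

-- the machine inside a zone block agrees with A's balanced-paren scan
theorem pvMachB_zone (l : List Char) (fuel : Nat) (j : Nat) (p : Option Char) (d : Int)
    (hd : 0 < d) (hf : l.length ≤ fuel + j) :
    pvMachB (l.drop j) p d false false
      = pvMachB (l.drop (pvFindEndA l fuel j d + 1)) (pvPrevAt l (pvFindEndA l fuel j d + 1))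
          0 false false := by
  induction fuel generalizing j d with
  | zero =>
      have h1 : l.drop j = [] := List.drop_eq_nil_of_le (by omega)
      have h2 : l.drop (pvFindEndA l 0 j d + 1) = [] := by
        simp only [pvFindEndA]; exact List.drop_eq_nil_of_le (by omega)
      rw [h1, h2]; rfl
  | succ f ih =>
      have hd0 : d ≠ 0 := by omega
      by_cases hj : j < l.length
      · rw [pvDrop_cons l j hj]
        simp only [pvFindEndA, hj, if_true]
        by_cases ho : l.getD j ' ' = '('
        · rw [if_pos ho]
          simp only [pvMachB, hd0, if_false, ho, if_true, Bool.false_eq_true]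
          rw [pvMachB_prev_irrel _ _ p _ _ _ (by omega : d + 1 ≠ 0)]
          exact ih (j + 1) (d + 1) (by omega) (by omega)
        · rw [if_neg ho]
          by_cases hc : l.getD j ' ' = ')'
          · rw [if_pos hc]
            by_cases hz : d - 1 = 0
            · rw [if_pos hz]
              simp only [pvMachB, hd0, if_false, hc, if_true, hz,
                Bool.false_eq_true]
              have hpv : pvPrevAt l (j + 1) = some (l.getD j ' ') := by
                simp [pvPrevAt]
              rw [hpv, hc]
              simp
            · rw [if_neg hz]
              simp only [pvMachB, hd0, if_false, hc, if_true,
                Bool.false_eq_true]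
              rw [pvMachB_prev_irrel _ _ p _ _ _ hz]
              exact ih (j + 1) (d - 1) (by omega) (by omega)
          · rw [if_neg hc]
            by_cases hq : l.getD j ' ' = '"'
            · rw [if_pos hq]
              simp only [pvMachB, hd0, if_false, hq, if_true,
                Bool.false_eq_true]
              rw [pvMachB_prev_irrel _ _ p _ _ _ hd0,
                pvMachB_string l l.length (j + 1) p d hd0 (by omega)]
              have hk := pvSkipStrA_ge l l.length (j + 1)
              exact ih (pvSkipStrA l l.length (j + 1) + 1) d hd (by omega)
            · rw [if_neg hq]
              simp only [pvMachB, hd0, if_false, ho, hc, hq,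
                Bool.false_eq_true]
              rw [pvMachB_prev_irrel _ _ p _ _ _ hd0]
              exact ih (j + 1) d (by omega) (by omega)
      · have h1 : l.drop j = [] := List.drop_eq_nil_of_le (by omega)
        have h2 : l.drop (pvFindEndA l (f + 1) j d + 1) = [] := by
          have := pvFindEndA_ge l (f + 1) j d
          exact List.drop_eq_nil_of_le (by omega)
        rw [h1, h2]; rfl

-- B's zone test at the head of l.drop i equals A's indexed zone test
theorem pvZone_eq (l : List Char) (i : Nat) :
    pvZoneStartB (l.drop i) (pvPrevAt l i) = pvZoneAtA l i := by
  unfold pvZoneStartB pvZoneAtA pvPrevAt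
  by_cases h0 : i = 0
  · simp [h0]
  · simp [h0]

-- if the zone test holds at i < len then the char at i is '('
theorem pvZone_head (l : List Char) (i : Nat) (hi : i < l.length)
    (hz : pvZoneAtA l i = true) : l.getD i ' ' = '(' := by
  unfold pvZoneAtA at hz
  rw [Bool.and_eq_true, decide_eq_true_eq] at hz
  have := hz.1
  rw [pvDrop_cons l i hi] at this
  simpa using congrArg (fun t => t.headD ' ') this

-- the core correspondence: A's copy-or-skip loop equals B's state machine
theorem pvLoopA_eq (l : List Char) (fuel : Nat) (i : Nat) (acc : List Char)
    (hf : l.length ≤ fuel + i) :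
    pvLoopA l fuel i acc = acc ++ pvMachB (l.drop i) (pvPrevAt l i) 0 false false := by
  induction fuel generalizing i acc with
  | zero =>
      have h1 : l.drop i = [] := List.drop_eq_nil_of_le (by omega)
      rw [h1]; simp [pvLoopA, pvMachB]
  | succ f ih =>
      simp only [pvLoopA]
      by_cases hi : i < l.length
      · rw [if_pos hi]
        by_cases hz : pvZoneAtA l i = true
        · rw [if_pos hz]
          -- machine side: zone entered, '(' consumed
          rw [pvDrop_cons l i hi]
          simp only [pvMachB, if_true]
          rw [← pvDrop_cons l i hi, pvZone_eq, hz]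
          simp only [if_true]
          -- A side: unfold pvFindEndA once ('(' seen, depth 0 → 1)
          have hlen : l.length = (l.length - 1) + 1 := by omega
          have hA : pvFindEndA l l.length i 0 = pvFindEndA l (l.length - 1) (i + 1) 1 := by
            conv_lhs => rw [hlen]
            simp only [pvFindEndA, hi, if_true, pvZone_head l i hi hz]
            norm_num
          rw [pvMachB_prev_irrel _ _ (pvPrevAt l (i + 1)) _ _ _ (by omega : (1:Int) ≠ 0),
            pvMachB_zone l (l.length - 1) (i + 1) _ 1 (by omega) (by omega), ← hA]
          have hge := pvFindEndA_ge l l.length i 0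
          exact ih (pvFindEndA l l.length i 0 + 1) acc (by omega)
        · rw [if_neg hz]
          rw [pvDrop_cons l i hi]
          simp only [pvMachB, if_true]
          rw [← pvDrop_cons l i hi, pvZone_eq, if_neg hz]
          have hp : some (l.getD i ' ') = pvPrevAt l (i + 1) := by simp [pvPrevAt]
          rw [hp, ih (i + 1) (acc ++ [l.getD i ' ']) (by omega)]
          simp
      · rw [if_neg hi]
        have h1 : l.drop i = [] := List.drop_eq_nil_of_le (by omega)
        rw [h1]; simp [pvMachB]

-- ===== VERDICT (by name: the statement is the Claim_ definition above) =====
theorem remove_all_zones_spec : Claim_equal_remove_all_zones := by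
  intro text _
  unfold Spec_remove_all_zones remove_all_zones remove_all_zones_alt
  rw [pvLoopA_eq text.toList text.toList.length 0 [] (by omega)]
  rfl
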